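-- pv_equiv track=rewrite | github.com/pypi-data/pypi-mirror-306 | packages/mcp-persor/mcp_persor-1.0.3.tar.gz/mcp_persor-1.0.3/mcp_persor/persor.py | __get_hierarchy_tokens
-- ===== SOURCE A (Python) =====
-- def __get_hierarchy_tokens(lines):
--     """
--     BVHファイルからHierarchy部をトークンごとの配列に変換する
--
--     Parameters
--     ----------
--     lines : list
--         BVHファイルの行データ
--
--     Returns
--     -------
--     list
--         階層構造のトークン
--     """
--
--     tokens = []
--     index = 0
--     nesting_level = 0
--     is_closeing = False
--
--     for i in range(len(lines)):
--         line = lines.pop(0)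
--         tokens += line.split()
--         nesting_level += line.count("{") - line.count("}")
--         index += 1
--         if line.count("}") > 0:
--             is_closeing = True
--         if nesting_level == 0 and is_closeing:
--             break
--
--     return tokens
-- ===== SOURCE B (Python) =====
-- def _step(state, line):
--     # fold one line into the (nesting level, close-seen) summary state
--     level, seen = state
--     return (level + line.count("{") - line.count("}"),
--             seen or line.count("}") > 0)
--
--
-- def __get_hierarchy_tokens(lines):
--     # Staged pipeline: build the per-line (cumulative nesting, close-seen)
--     # summary list, locate the first closing line in it, then extract all
--     # tokens in one bulk join+split and consume the section from `lines`.
--     summaries = []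
--     state = (0, False)
--     for line in lines:
--         state = _step(state, line)
--         summaries.append(state)
--     cutoff = len(lines)
--     for i, (level, seen) in enumerate(summaries):
--         if level == 0 and seen:
--             cutoff = i + 1
--             break
--     tokens = " ".join(lines[:cutoff]).split()
--     del lines[:cutoff]
--     return tokens
-- ===== Notes on version B (the rewrite author's own statement) =====
-- stated objective: faster
-- what changed: B is a staged pipeline: it first builds a per-line (cumulative nesting, close-seen) summary list (a scan), then finds the first closing index in that list, then produces all tokens in one bulk ' '.join(lines[:cutoff]).split() and consumes the section with a single del lines[:cutoff] - instead of A's single fused loop that pops each line from the front (shifting the whole list every iteration) while accumulating split tokens and the nesting state together.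
import Mathlib
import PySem

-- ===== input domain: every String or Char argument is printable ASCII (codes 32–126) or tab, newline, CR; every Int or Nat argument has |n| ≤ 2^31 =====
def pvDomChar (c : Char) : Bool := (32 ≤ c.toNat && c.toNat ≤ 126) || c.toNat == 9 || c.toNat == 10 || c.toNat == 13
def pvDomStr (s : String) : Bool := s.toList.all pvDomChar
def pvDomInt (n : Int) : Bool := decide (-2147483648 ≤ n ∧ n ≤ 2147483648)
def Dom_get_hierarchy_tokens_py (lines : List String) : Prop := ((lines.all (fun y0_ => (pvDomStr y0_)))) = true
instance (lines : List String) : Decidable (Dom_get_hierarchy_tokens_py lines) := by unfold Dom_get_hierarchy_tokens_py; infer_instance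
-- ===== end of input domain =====

-- B stages the work (summary scan, closing-index search, one bulk join+split), not the result;
-- both Pythons mutate `lines` identically (A pops each consumed line, B deletes the same front
-- slice); the equivalence proved here is about the RETURN value only.

-- ===== PORT A =====
-- A: pop each line from the front, append its split() tokens, track nesting and break on close.
def pvGoA (ls : List String) (tokens : List String) (nesting : Int) (closing : Bool) :
    List String :=
  match ls with
  | [] => tokens
  | line :: rest =>
      let tokens' := tokens ++ PySem.Str.split₀ line
      let nesting' := nesting + (PySem.Str.count line "{" : Int) - (PySem.Str.count line "}" : Int)
      let closing' := if PySem.Str.count line "}" > 0 then true else closing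
      if nesting' == 0 && closing' then tokens' else pvGoA rest tokens' nesting' closing'

def get_hierarchy_tokens_py (lines : List String) : List String :=
  pvGoA lines [] 0 false

-- ===== PORT B =====
-- B helper _step: fold one line into the (nesting level, close-seen) summary state
def pvStep (st : Int × Bool) (line : String) : Int × Bool :=
  (st.1 + (PySem.Str.count line "{" : Int) - (PySem.Str.count line "}" : Int),
   st.2 || decide (PySem.Str.count line "}" > 0))

-- B: summaries = running _step states over the lines; cutoff = one past the first summary with
-- level 0 and a close seen (default: all lines); tokens = " ".join(lines[:cutoff]).split()
def get_hierarchy_tokens_py_alt (lines : List String) : List String :=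
  let summaries := (lines.scanl pvStep (0, false)).tail
  let cutoff := match summaries.findIdx? (fun s => s.1 == 0 && s.2) with
    | some i => i + 1
    | none => lines.length
  PySem.Str.split₀ (PySem.Str.join " " (lines.take cutoff))

-- ===== PRECONDITION & SPEC =====
def Spec_get_hierarchy_tokens_py (lines : List String) (out : List String) : Prop := out = get_hierarchy_tokens_py_alt lines
instance (lines : List String) (out : List String) : Decidable (Spec_get_hierarchy_tokens_py lines out) := by unfold Spec_get_hierarchy_tokens_py; infer_instance

-- ===== CLAIM (what is proved, stated in full; the proofs are below) =====
def Claim_equal_get_hierarchy_tokens_py : Prop := ∀ (lines : List String), Dom_get_hierarchy_tokens_py lines → Spec_get_hierarchy_tokens_py lines (get_hierarchy_tokens_py lines)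

-- ===== LEMMAS AND PROOFS =====

-- proof-only abbreviation for B's cutoff computation, started from an arbitrary state
def pvCut (ls : List String) (st : Int × Bool) : Nat :=
  match ((ls.scanl pvStep st).tail).findIdx? (fun s => s.1 == 0 && s.2) with
  | some i => i + 1
  | none => ls.length

theorem pvScanl_cons_tail (b : Int × Bool) (l : List String) :
    List.scanl pvStep b l = b :: (List.scanl pvStep b l).tail := by
  cases l <;> simp [List.scanl_nil, List.scanl_cons]

theorem pvCut_cons (line : String) (rest : List String) (st : Int × Bool) :
    pvCut (line :: rest) st =
      if ((pvStep st line).1 == 0 && (pvStep st line).2) then 1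
      else pvCut rest (pvStep st line) + 1 := by
  unfold pvCut
  rw [List.scanl_cons, List.tail_cons, pvScanl_cons_tail (pvStep st line) rest, List.findIdx?_cons]
  by_cases h : ((pvStep st line).1 == 0 && (pvStep st line).2) = true
  · simp [h]
  · cases hfi : (List.scanl pvStep (pvStep st line) rest).tail.findIdx? (fun s => s.1 == 0 && s.2) <;>
      simp [h, hfi]

-- pvCut_cons with pvStep expanded into A's update expressions
theorem pvCut_cons2 (line : String) (rest : List String) (n : Int) (c : Bool) :
    pvCut (line :: rest) (n, c) =
      if ((n + (PySem.Str.count line "{" : Int) - (PySem.Str.count line "}" : Int) == 0) &&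
          (if PySem.Str.count line "}" > 0 then true else c)) then 1
      else pvCut rest
            (n + (PySem.Str.count line "{" : Int) - (PySem.Str.count line "}" : Int),
             if PySem.Str.count line "}" > 0 then true else c) + 1 := by
  rw [pvCut_cons]
  by_cases hp : PySem.Str.count line "}" > 0 <;> simp [pvStep, hp, Bool.or_comm]

-- split₀.go flushes its accumulator to the front of the result
theorem pvGo_acc (s : List Char) : ∀ (cur : List Char) (acc : List (List Char)),
    PySem.Chars.split₀.go s cur acc = acc.reverse ++ PySem.Chars.split₀.go s cur [] := by
  induction s with
  | nil =>
      intro cur acc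
      simp only [PySem.Chars.split₀.go]
      by_cases h : cur.isEmpty <;> simp [h]
  | cons c rest ih =>
      intro cur acc
      simp only [PySem.Chars.split₀.go]
      by_cases hs : PySem.Chars.isspace c
      · by_cases h : cur.isEmpty <;> simp [hs, h, ih [] acc, ih [] [cur.reverse], ih [] (cur.reverse :: acc)]
      · simp [hs, ih (c :: cur) acc]

-- splitting at a whitespace separator splits the word list
theorem pvSplit_append (a b : List Char) : ∀ (cur : List Char),
    PySem.Chars.split₀.go (a ++ ' ' :: b) cur [] =
      PySem.Chars.split₀.go a cur [] ++ PySem.Chars.split₀.go b [] [] := by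
  induction a with
  | nil =>
      intro cur
      simp only [List.nil_append, PySem.Chars.split₀.go]
      have hs : PySem.Chars.isspace ' ' = true := by decide
      by_cases h : cur.isEmpty <;>
        simp [hs, h, pvGo_acc b [] [cur.reverse]]
  | cons c a' ih =>
      intro cur
      simp only [List.cons_append, PySem.Chars.split₀.go]
      by_cases hs : PySem.Chars.isspace c
      · by_cases h : cur.isEmpty <;>
          simp [hs, h, ih [], pvGo_acc (a' ++ ' ' :: b) [] [cur.reverse],
                pvGo_acc a' [] [cur.reverse]]
      · simp [hs, ih (c :: cur)]

theorem pvChars_split_append (a b : List Char) :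
    PySem.Chars.split₀ (a ++ ' ' :: b) = PySem.Chars.split₀ a ++ PySem.Chars.split₀ b := by
  simpa [PySem.Chars.split₀] using pvSplit_append a b []

theorem pvChars_split_join (css : List (List Char)) :
    PySem.Chars.split₀ (PySem.Chars.join [' '] css) = css.flatMap PySem.Chars.split₀ := by
  induction css with
  | nil => simp [PySem.Chars.join, PySem.Chars.split₀, PySem.Chars.split₀.go, List.intercalate]
  | cons x rest ih =>
      cases rest with
      | nil => simp [PySem.Chars.join, List.intercalate]
      | cons y r =>
          have h : PySem.Chars.join [' '] (x :: y :: r) = x ++ ' ' :: PySem.Chars.join [' '] (y :: r) := by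
            simp [PySem.Chars.join, List.intercalate, List.intersperse]
          rw [h, pvChars_split_append, ih]
          simp

theorem pvStr_toList_inj : Function.Injective String.toList := by
  intro a b h
  have := congrArg String.ofList h
  simpa using this

theorem pvStr_split_join (xs : List String) :
    PySem.Str.split₀ (PySem.Str.join " " xs) = xs.flatMap PySem.Str.split₀ := by
  apply List.map_injective_iff.mpr pvStr_toList_inj
  rw [PySem.Str.split₀_map_toList, PySem.Str.toList_join]
  have : (" " : String).toList = [' '] := by decide
  rw [this, pvChars_split_join, List.map_flatMap, List.flatMap_map]
  congr 1
  funext s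
  exact (PySem.Str.split₀_map_toList s).symm

-- A's loop equals: take B's cutoff prefix, flatMap split₀ over it
theorem pvLoop (ls : List String) : ∀ (tokens : List String) (n : Int) (c : Bool),
    pvGoA ls tokens n c = tokens ++ (ls.take (pvCut ls (n, c))).flatMap PySem.Str.split₀ := by
  induction ls with
  | nil => intro tokens n c; simp [pvGoA, pvCut]
  | cons line rest ih =>
      intro tokens n c
      simp only [pvGoA, pvCut_cons2]
      split_ifs <;> first
        | (rw [ih]; simp)
        | simp

-- ===== VERDICT (by name: the statement is the Claim_ definition above) =====
theorem get_hierarchy_tokens_py_spec : Claim_equal_get_hierarchy_tokens_py := by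
  intro lines _
  show get_hierarchy_tokens_py lines = get_hierarchy_tokens_py_alt lines
  have halt : get_hierarchy_tokens_py_alt lines =
      PySem.Str.split₀ (PySem.Str.join " " (lines.take (pvCut lines (0, false)))) := rfl
  rw [get_hierarchy_tokens_py, halt, pvLoop, pvStr_split_join]
  simp
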